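-- pv_equiv track=rewrite | github.com/elxecutor/advanced-password | accounts/advanced_password_checker.py | check_dictionary_words
-- ===== SOURCE A (Python) =====
-- def check_dictionary_words(password: str, dictionary: set) -> bool:
--     lower_pwd = password.lower()
--     if lower_pwd in dictionary:
--         return True
--     for i in range(len(lower_pwd)):
--         for j in range(i + 4, len(lower_pwd) + 1):
--             if lower_pwd[i:j] in dictionary:
--                 return True
--     return False
-- ===== SOURCE B (Python) =====
-- def check_dictionary_words(password: str, dictionary: set) -> bool:
--     lower_pwd = password.lower()
--     return any(word == lower_pwd or (len(word) >= 4 and word in lower_pwd)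
--                for word in dictionary)
-- ===== Notes on version B (the rewrite author's own statement) =====
-- stated objective: faster
-- what changed: A enumerates all O(n^2) substrings of length>=4 of the lowered password and looks each up in the dictionary; B instead iterates over the dictionary once and does a single equality/substring check per word.
import Mathlib
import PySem

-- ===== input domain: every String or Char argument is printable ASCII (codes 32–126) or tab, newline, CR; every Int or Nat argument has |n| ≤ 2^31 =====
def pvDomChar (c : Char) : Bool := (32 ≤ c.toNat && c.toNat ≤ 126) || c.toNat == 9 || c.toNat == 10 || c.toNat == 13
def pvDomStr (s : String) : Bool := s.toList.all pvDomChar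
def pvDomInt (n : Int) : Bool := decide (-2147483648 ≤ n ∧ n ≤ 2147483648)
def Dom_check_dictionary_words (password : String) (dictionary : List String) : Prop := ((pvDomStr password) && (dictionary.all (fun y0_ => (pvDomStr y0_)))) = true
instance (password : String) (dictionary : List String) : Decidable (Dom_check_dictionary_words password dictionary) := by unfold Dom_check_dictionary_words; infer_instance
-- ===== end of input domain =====

-- A scans every substring of the lowered password of length ≥ 4 and looks it up in the
-- dictionary (O(n^2) substrings); B instead iterates over the dictionary once and does one
-- substring search per word — simpler and faster when the dictionary is small relative to n^2.

-- ===== PORT A =====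
def check_dictionary_words (password : String) (dictionary : List String) : Bool :=
  let lower_pwd := PySem.Str.lower password
  if PySem.Set.contains dictionary lower_pwd then true
  else
    (PySem.List.pyRange 0 (PySem.Str.len lower_pwd) 1).any (fun i =>
      (PySem.List.pyRange (i + 4) (PySem.Str.len lower_pwd + 1) 1).any (fun j =>
        PySem.Set.contains dictionary (PySem.Str.slice lower_pwd (some i) (some j))))

-- ===== PORT B =====
def check_dictionary_words_alt (password : String) (dictionary : List String) : Bool :=
  let lower_pwd := PySem.Str.lower password
  dictionary.any (fun word =>
    word == lower_pwd || (decide (4 ≤ PySem.Str.len word) && PySem.Str.isIn word lower_pwd))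

-- ===== PRECONDITION & SPEC =====
def Spec_check_dictionary_words (password : String) (dictionary : List String) (out : Bool) : Prop := out = check_dictionary_words_alt password dictionary
instance (password : String) (dictionary : List String) (out : Bool) : Decidable (Spec_check_dictionary_words password dictionary out) := by unfold Spec_check_dictionary_words; infer_instance

-- ===== CLAIM (what is proved, stated in full; the proofs are below) =====
def Claim_equal_check_dictionary_words : Prop := ∀ (password : String) (dictionary : List String), Dom_check_dictionary_words password dictionary → Spec_check_dictionary_words password dictionary (check_dictionary_words password dictionary)

-- ===== LEMMAS AND PROOFS =====

-- Core equivalence, with the lowered password abstracted to an arbitrary string lp.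
theorem pv_core (lp : String) (dict : List String) :
    (if PySem.Set.contains dict lp then true
     else
       (PySem.List.pyRange 0 (PySem.Str.len lp) 1).any (fun i =>
         (PySem.List.pyRange (i + 4) (PySem.Str.len lp + 1) 1).any (fun j =>
           PySem.Set.contains dict (PySem.Str.slice lp (some i) (some j)))))
    = dict.any (fun word =>
        word == lp || (decide (4 ≤ PySem.Str.len word) && PySem.Str.isIn word lp)) := by
  rw [Bool.eq_iff_iff]
  split_ifs with h
  · rw [PySem.Set.contains_iff] at h
    simp only [List.any_eq_true, Bool.or_eq_true, beq_iff_eq, true_iff]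
    exact ⟨lp, h, Or.inl rfl⟩
  · rw [PySem.Set.contains_iff] at h
    simp only [List.any_eq_true, PySem.List.mem_pyRange_one, Bool.or_eq_true, beq_iff_eq,
      Bool.and_eq_true, decide_eq_true_eq, PySem.Str.isIn_iff_infix, PySem.Str.len_eq]
    constructor
    · rintro ⟨i, ⟨hi0, hilt⟩, j, ⟨hij, hjlt⟩, hmem⟩
      rw [PySem.Set.contains_iff] at hmem
      refine ⟨_, hmem, Or.inr ?_⟩
      have hj0 : (0 : Int) ≤ j := by omega
      have htl : (PySem.Str.slice lp (some i) (some j)).toList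
          = (lp.toList.drop i.toNat).take (j.toNat - i.toNat) := by
        rw [PySem.Str.toList_slice, PySem.Chars.slice_eq_listSlice,
          PySem.List.slice_toNat lp.toList hi0 hj0]
      have hlen : ((PySem.Str.slice lp (some i) (some j)).toList).length
          = j.toNat - i.toNat := by
        rw [htl, List.length_take, List.length_drop]; omega
      constructor
      · rw [hlen]; omega
      · rw [htl]
        exact ((lp.toList.drop i.toNat).take_prefix _).isInfix.trans
          (lp.toList.drop_suffix i.toNat).isInfix
    · rintro ⟨w, hw, hcase⟩
      rcases hcase with rfl | ⟨hlen4, hinf⟩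
      · exact absurd hw h
      · rcases hinf with ⟨s, t, hst⟩
        have hlen4' : 4 ≤ w.toList.length := by exact_mod_cast hlen4
        have hlp : lp.toList = s ++ (w.toList ++ t) := by rw [← hst]; simp
        refine ⟨(s.length : Int), ⟨by positivity, ?_⟩,
          (s.length : Int) + (w.toList.length : Int), ⟨by omega, ?_⟩, ?_⟩
        · have : lp.toList.length = s.length + w.toList.length + t.length := by
            rw [hlp]; simp; omega
          omega
        · have : lp.toList.length = s.length + w.toList.length + t.length := by
            rw [hlp]; simp; omega
          omega
        · rw [PySem.Set.contains_iff]
          have : PySem.Str.slice lp (some (s.length : Int))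
              (some ((s.length : Int) + (w.toList.length : Int))) = w := by
            apply String.toList_inj.mp
            rw [PySem.Str.toList_slice, PySem.Chars.slice_eq_listSlice,
              PySem.List.slice_natCast_add, hlp, List.drop_left, List.take_left]
          rw [this]; exact hw

-- ===== VERDICT (by name: the statement is the Claim_ definition above) =====
theorem check_dictionary_words_spec : Claim_equal_check_dictionary_words := by
  intro password dictionary _
  unfold Spec_check_dictionary_words check_dictionary_words check_dictionary_words_alt
  exact pv_core (PySem.Str.lower password) dictionary
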